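-- pv_equiv track=rewrite | github.com/ronshuvy/IntroToCS-Course-Projects | Ex5 - Word Search/wordsearch.py | search_for_words
-- ===== SOURCE A (Python) =====
-- def search_for_words(mat, direction):
--     """ Searches for words in matrix in a given direction
--      and return list of all words
--     :param mat: 2D list which contains letters
--     :param direction: letter as a direction
--     :return: list of all strings found with the direction
--     """
--
--     def direction_instruction\
--                     (direc, curr_row, curr_colm, total_rows, total_colms):
--         """
--         Sends back an instruction of behavior about a specific direction
--         :param direc: direction
--         :param curr_row: the element's row id
--         :param curr_colm: the element's column id
--         :param total_rows: number of matrix rows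
--         :param total_colms: number of matrix columns
--         :return: two integers : step (how many times to move on) and jump
--         (in which order to scan) in a loop
--         jump's value : 1 or -1
--         """
--         if direc == 'r':
--             return (total_colms - curr_colm), 1
--         if direc == 'l':
--             return -(curr_colm + 1), -1
--         if direc == 'u':
--             return -(curr_row + 1), -1
--         if direc == 'd':
--             return total_rows - curr_row, 1
--         if direc == 'w':
--             return -(curr_row + 1), -1
--         if direc == 'x':
--             return -(curr_row + 1), -1
--         if direc == 'y':
--             return total_rows - curr_row, 1
--         return total_rows - curr_row, 1  # for 'z' direction
--
--     def set_shifts(direc, curr_colm, curr_shift):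
--         """
--         Determines the number of shifts of the i-row and the j-column of an
--         element
--         :param direc: direction
--         :param curr_colm: the element's column id
--         :param curr_shift: the current iteration in loop, i.e how much to move
--         :return: 4 integers :
--         shift of i-row, shift of j-column,
--         position in matrix and halt(final) position
--         Notice: position and final position are only relevant to diagonal
--         shifts.
--         """
--         if direc in 'r':
--             return 0, curr_shift, None, None
--         if direc in 'l':
--             return 0, curr_shift, None, None
--         if direc in "ud":
--             return curr_shift, 0, None, None
--         if direc in 'w':
--             return curr_shift, -curr_shift, (curr_colm - curr_shift),\
--                    (cols - 1)
--         if direc in 'x':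
--             return curr_shift, curr_shift, (curr_colm + curr_shift), 0
--         if direc in 'y':
--             return curr_shift, curr_shift, (curr_colm + curr_shift),\
--                    (cols - 1)
--         return curr_shift, -curr_shift,\
--                (curr_colm - curr_shift), 0  # for 'z' direction
--
--     strings_lst = []  # all collected words in the matrix
--     rows = len(mat)  # number of rows in matrix
--     cols = len(mat[0])  # number of columns in matrix
--     for i in range(rows):
--         for j in range(cols):
--             # scans all the words for an element[i][j]
--             steps, jump = direction_instruction(direction, i, j, rows, cols)
--             mat_str = ""  # represents a single word each time
--
--             for shift in range(0, steps, jump):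
--                 shift_i, shift_j, pos, final_pos =\
--                     set_shifts(direction, j, shift)
--
--                 # only for diagonal shifts
--                 if direction in "wxyz" and pos == final_pos:
--                     mat_str += mat[i + shift_i][j + shift_j]
--                     strings_lst.append(mat_str)
--                     break
--                 mat_str += mat[i + shift_i][j + shift_j]
--                 strings_lst.append(mat_str)
--     return strings_lst
-- ===== SOURCE B (Python) =====
-- def search_for_words(mat, direction):
--     """Collect every directional prefix word from the grid: for each cell,
--     walk in the direction's unit step, appending each growing prefix."""
--     deltas = {'r': (0, 1), 'l': (0, -1), 'u': (-1, 0), 'd': (1, 0),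
--               'w': (-1, 1), 'x': (-1, -1), 'y': (1, 1), 'z': (1, -1)}
--     di, dj = deltas[direction]
--     rows, cols = len(mat), len(mat[0])
--     words = []
--     for i in range(rows):
--         for j in range(cols):
--             word, r, c = "", i, j
--             while 0 <= r < rows and 0 <= c < cols:
--                 word += mat[r][c]
--                 words.append(word)
--                 r += di
--                 c += dj
--     return words
-- ===== Notes on version B (the rewrite author's own statement) =====
-- stated objective: simpler
-- what changed: B replaces A's per-direction step-count/jump arithmetic and the diagonal pos==final_pos break with a direction-to-unit-step-vector map and a single bounds-checked walk from each cell.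
-- outside the precondition, e.g. on search_for_words([['a', 'b'], ['c', 'd']], 'q'): A returns ['a', 'ad', 'b', 'bc', 'c', 'd'], B raises KeyError
import Mathlib
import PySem

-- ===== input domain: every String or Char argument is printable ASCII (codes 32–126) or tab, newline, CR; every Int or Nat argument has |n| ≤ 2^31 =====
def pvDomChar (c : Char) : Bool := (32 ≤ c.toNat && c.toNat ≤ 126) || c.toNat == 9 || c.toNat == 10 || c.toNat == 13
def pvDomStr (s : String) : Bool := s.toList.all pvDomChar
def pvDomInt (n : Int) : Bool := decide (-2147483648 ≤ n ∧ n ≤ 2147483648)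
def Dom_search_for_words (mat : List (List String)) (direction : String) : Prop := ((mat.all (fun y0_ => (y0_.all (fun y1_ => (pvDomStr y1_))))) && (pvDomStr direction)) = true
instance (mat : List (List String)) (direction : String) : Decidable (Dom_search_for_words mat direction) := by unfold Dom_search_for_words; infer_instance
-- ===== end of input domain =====

-- B replaces A's per-direction step-count/jump arithmetic and pos==final_pos break by a
-- direction → unit-step map and a single bounds-checked walk (objective: simpler).

-- ===== PORT A =====
-- mat[r][c] with Python indexing; inside Pre_ every access is in range, so the
-- defaults (where Python would raise IndexError) are never reached.
def pvCell (mat : List (List String)) (r c : Int) : String :=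
  (PySem.List.pyGet? ((PySem.List.pyGet? mat r).getD []) c).getD ""

def direction_instruction (direc : String) (curr_row curr_colm total_rows total_colms : Int) :
    Int × Int :=
  if direc = "r" then (total_colms - curr_colm, 1)
  else if direc = "l" then (-(curr_colm + 1), -1)
  else if direc = "u" then (-(curr_row + 1), -1)
  else if direc = "d" then (total_rows - curr_row, 1)
  else if direc = "w" then (-(curr_row + 1), -1)
  else if direc = "x" then (-(curr_row + 1), -1)
  else if direc = "y" then (total_rows - curr_row, 1)
  else (total_rows - curr_row, 1)  -- for 'z' direction

def set_shifts (cols : Int) (direc : String) (curr_colm curr_shift : Int) :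
    Int × Int × Option Int × Option Int :=
  if PySem.Str.isIn direc "r" then (0, curr_shift, none, none)
  else if PySem.Str.isIn direc "l" then (0, curr_shift, none, none)
  else if PySem.Str.isIn direc "ud" then (curr_shift, 0, none, none)
  else if PySem.Str.isIn direc "w" then (curr_shift, -curr_shift, some (curr_colm - curr_shift), some (cols - 1))
  else if PySem.Str.isIn direc "x" then (curr_shift, curr_shift, some (curr_colm + curr_shift), some 0)
  else if PySem.Str.isIn direc "y" then (curr_shift, curr_shift, some (curr_colm + curr_shift), some (cols - 1))
  else (curr_shift, -curr_shift, some (curr_colm - curr_shift), some 0)  -- for 'z' direction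

-- the inner 'for shift in range(0, steps, jump)' loop with its break
def innerA (mat : List (List String)) (direction : String) (cols i j : Int) :
    List Int → String → List String → List String
  | [], _, acc => acc
  | shift :: rest, mat_str, acc =>
    match set_shifts cols direction j shift with
    | (shift_i, shift_j, pos, final_pos) =>
      if PySem.Str.isIn direction "wxyz" && (pos == final_pos) then
        acc ++ [mat_str ++ pvCell mat (i + shift_i) (j + shift_j)]
      else
        innerA mat direction cols i j rest (mat_str ++ pvCell mat (i + shift_i) (j + shift_j))
          (acc ++ [mat_str ++ pvCell mat (i + shift_i) (j + shift_j)])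

def search_for_words (mat : List (List String)) (direction : String) : List String :=
  let rows : Int := mat.length
  let cols : Int := (((PySem.List.pyGet? mat 0).getD []).length : Int)
  (PySem.List.pyRange 0 rows 1).foldl (fun acc i =>
    (PySem.List.pyRange 0 cols 1).foldl (fun acc j =>
      let sj := direction_instruction direction i j rows cols
      innerA mat direction cols i j (PySem.List.pyRange 0 sj.1 sj.2) "" acc) acc) []

-- ===== PORT B =====
def bDeltas : PySem.Dict String (Int × Int) :=
  PySem.Dict.ofList
    [("r", (0, 1)), ("l", (0, -1)), ("u", (-1, 0)), ("d", (1, 0)),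
     ("w", (-1, 1)), ("x", (-1, -1)), ("y", (1, 1)), ("z", (1, -1))]

-- the 'while 0 <= r < rows and 0 <= c < cols' walk; fuel only makes it total
-- (each step moves one row or one column monotonically, so the start fuel is never exhausted)
def bWalk (mat : List (List String)) (rows cols di dj : Int) :
    Nat → Int → Int → String → List String → List String
  | 0, _, _, _, acc => acc
  | fuel + 1, r, c, word, acc =>
    if 0 ≤ r ∧ r < rows ∧ 0 ≤ c ∧ c < cols then
      bWalk mat rows cols di dj fuel (r + di) (c + dj) (word ++ pvCell mat r c)
        (acc ++ [word ++ pvCell mat r c])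
    else acc

def search_for_words_alt (mat : List (List String)) (direction : String) : List String :=
  match PySem.Dict.get? bDeltas direction with
  | none => []  -- KeyError in Python; outside Pre_
  | some (di, dj) =>
    let rows : Int := mat.length
    let cols : Int := (((PySem.List.pyGet? mat 0).getD []).length : Int)
    (PySem.List.pyRange 0 rows 1).foldl (fun acc i =>
      (PySem.List.pyRange 0 cols 1).foldl (fun acc j =>
        bWalk mat rows cols di dj ((rows + cols).toNat + 1) i j "" acc) acc) []

-- ===== PRECONDITION & SPEC =====
-- Pre_ excludes: empty matrices and matrices whose later rows are shorter than row 0 (A raises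
-- IndexError there), and direction strings other than the eight one-letter directions, where A's
-- negative-index-wraparound fallback accidentally returns values while B's dict lookup raises KeyError.
def Pre_search_for_words (mat : List (List String)) (direction : String) : Prop :=
  mat ≠ [] ∧ (∀ row ∈ mat, (mat.headD []).length ≤ row.length) ∧
  direction ∈ (["r", "l", "u", "d", "w", "x", "y", "z"] : List String)
instance (mat : List (List String)) (direction : String) : Decidable (Pre_search_for_words mat direction) := by
  unfold Pre_search_for_words; infer_instance

def pvWitness_search_for_words : List (List String) × String := ([["a", "b"], ["c", "d"]], "w")

def Spec_search_for_words (mat : List (List String)) (direction : String) (out : List String) : Prop := out = search_for_words_alt mat direction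
instance (mat : List (List String)) (direction : String) (out : List String) : Decidable (Spec_search_for_words mat direction out) := by unfold Spec_search_for_words; infer_instance

-- ===== CLAIM (what is proved, stated in full; the proofs are below) =====
def Claim_equal_search_for_words : Prop := ∀ (mat : List (List String)) (direction : String), Dom_search_for_words mat direction → Pre_search_for_words mat direction → Spec_search_for_words mat direction (search_for_words mat direction)

-- ===== LEMMAS AND PROOFS =====

-- clean forms of set_shifts at the shift values the loop actually uses
theorem set_shifts_r (cols j t : Int) : set_shifts cols "r" j t = (0, t, none, none) := rfl
theorem set_shifts_l (cols j t : Int) : set_shifts cols "l" j (-t) = (0, -t, none, none) := rfl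
theorem set_shifts_u (cols j t : Int) : set_shifts cols "u" j (-t) = (-t, 0, none, none) := rfl
theorem set_shifts_d (cols j t : Int) : set_shifts cols "d" j t = (t, 0, none, none) := rfl
theorem set_shifts_w (cols j t : Int) :
    set_shifts cols "w" j (-t) = (-t, t, some (j + t), some (cols - 1)) := by
  have h : set_shifts cols "w" j (-t) = (-t, -(-t), some (j - -t), some (cols - 1)) := rfl
  rw [h, neg_neg, show j - -t = j + t from by ring]
theorem set_shifts_x (cols j t : Int) :
    set_shifts cols "x" j (-t) = (-t, -t, some (j - t), some 0) := by
  have h : set_shifts cols "x" j (-t) = (-t, -t, some (j + -t), some 0) := rfl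
  rw [h, show j + -t = j - t from by ring]
theorem set_shifts_y (cols j t : Int) :
    set_shifts cols "y" j t = (t, t, some (j + t), some (cols - 1)) := rfl
theorem set_shifts_z (cols j t : Int) :
    set_shifts cols "z" j t = (t, -t, some (j - t), some 0) := rfl

theorem inner_r (mat : List (List String)) (rows cols i j : Int)
    (hi0 : 0 ≤ i) (hi : i < rows) (hj0 : 0 ≤ j) :
    ∀ (fuel : Nat) (t : Int) (w : String) (acc : List String), 0 ≤ t → (cols - j - t).toNat < fuel →
    innerA mat "r" cols i j (PySem.List.pyRange t (cols - j) 1) w acc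
      = bWalk mat rows cols 0 1 fuel i (j + t) w acc := by
  intro fuel
  induction fuel with
  | zero => intro t w acc _ hf; omega
  | succ m ih =>
    intro t w acc ht hf
    by_cases hlt : t < cols - j
    · rw [PySem.List.pyRange_one_cons hlt]
      simp only [innerA, set_shifts_r]
      rw [if_neg (show ¬((PySem.Str.isIn "r" "wxyz" && ((none : Option Int) == none)) = true) from by decide)]
      rw [bWalk, if_pos (show 0 ≤ i ∧ i < rows ∧ 0 ≤ j + t ∧ j + t < cols from by omega)]
      rw [show (i + 0 : Int) = i from by ring, show (j + t + 1 : Int) = j + (t + 1) from by ring]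
      exact ih (t + 1) _ _ (by omega) (by omega)
    · rw [PySem.List.pyRange_one_eq_nil (by omega)]
      rw [innerA, bWalk, if_neg (by omega)]

theorem inner_d (mat : List (List String)) (rows cols i j : Int)
    (hi0 : 0 ≤ i) (hj0 : 0 ≤ j) (hjc : j < cols) :
    ∀ (fuel : Nat) (t : Int) (w : String) (acc : List String), 0 ≤ t → (rows - i - t).toNat < fuel →
    innerA mat "d" cols i j (PySem.List.pyRange t (rows - i) 1) w acc
      = bWalk mat rows cols 1 0 fuel (i + t) j w acc := by
  intro fuel
  induction fuel with
  | zero => intro t w acc _ hf; omega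
  | succ m ih =>
    intro t w acc ht hf
    by_cases hlt : t < rows - i
    · rw [PySem.List.pyRange_one_cons hlt]
      simp only [innerA, set_shifts_d]
      rw [if_neg (show ¬((PySem.Str.isIn "d" "wxyz" && ((none : Option Int) == none)) = true) from by decide)]
      rw [bWalk, if_pos (show 0 ≤ i + t ∧ i + t < rows ∧ 0 ≤ j ∧ j < cols from by omega)]
      rw [show (j + 0 : Int) = j from by ring, show (i + t + 1 : Int) = i + (t + 1) from by ring]
      exact ih (t + 1) _ _ (by omega) (by omega)
    · rw [PySem.List.pyRange_one_eq_nil (by omega)]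
      rw [innerA, bWalk, if_neg (by omega)]

theorem inner_l (mat : List (List String)) (rows cols i j : Int)
    (hi0 : 0 ≤ i) (hi : i < rows) (hjc : j < cols) :
    ∀ (fuel : Nat) (t : Int) (w : String) (acc : List String), 0 ≤ t → (j + 1 - t).toNat < fuel →
    innerA mat "l" cols i j (PySem.List.pyRange (-t) (-(j + 1)) (-1)) w acc
      = bWalk mat rows cols 0 (-1) fuel i (j - t) w acc := by
  intro fuel
  induction fuel with
  | zero => intro t w acc _ hf; omega
  | succ m ih =>
    intro t w acc ht hf
    by_cases hle : t ≤ j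
    · rw [PySem.List.pyRange_neg_one_cons (by omega)]
      simp only [innerA, set_shifts_l]
      rw [if_neg (show ¬((PySem.Str.isIn "l" "wxyz" && ((none : Option Int) == none)) = true) from by decide)]
      rw [bWalk, if_pos (show 0 ≤ i ∧ i < rows ∧ 0 ≤ j - t ∧ j - t < cols from by omega)]
      rw [show (i + 0 : Int) = i from by ring, show (j + -t : Int) = j - t from by ring,
        show (-t - 1 : Int) = -(t + 1) from by ring, show (j - t + -1 : Int) = j - (t + 1) from by ring]
      exact ih (t + 1) _ _ (by omega) (by omega)
    · rw [PySem.List.pyRange_neg_one_eq_nil (by omega)]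
      rw [innerA, bWalk, if_neg (by omega)]

theorem inner_u (mat : List (List String)) (rows cols i j : Int)
    (hi : i < rows) (hj0 : 0 ≤ j) (hjc : j < cols) :
    ∀ (fuel : Nat) (t : Int) (w : String) (acc : List String), 0 ≤ t → (i + 1 - t).toNat < fuel →
    innerA mat "u" cols i j (PySem.List.pyRange (-t) (-(i + 1)) (-1)) w acc
      = bWalk mat rows cols (-1) 0 fuel (i - t) j w acc := by
  intro fuel
  induction fuel with
  | zero => intro t w acc _ hf; omega
  | succ m ih =>
    intro t w acc ht hf
    by_cases hle : t ≤ i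
    · rw [PySem.List.pyRange_neg_one_cons (by omega)]
      simp only [innerA, set_shifts_u]
      rw [if_neg (show ¬((PySem.Str.isIn "u" "wxyz" && ((none : Option Int) == none)) = true) from by decide)]
      rw [bWalk, if_pos (show 0 ≤ i - t ∧ i - t < rows ∧ 0 ≤ j ∧ j < cols from by omega)]
      rw [show (j + 0 : Int) = j from by ring, show (i + -t : Int) = i - t from by ring,
        show (-t - 1 : Int) = -(t + 1) from by ring, show (i - t + -1 : Int) = i - (t + 1) from by ring]
      exact ih (t + 1) _ _ (by omega) (by omega)
    · rw [PySem.List.pyRange_neg_one_eq_nil (by omega)]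
      rw [innerA, bWalk, if_neg (by omega)]

theorem inner_w (mat : List (List String)) (rows cols i j : Int)
    (hi : i < rows) (hj0 : 0 ≤ j) :
    ∀ (fuel : Nat) (t : Int) (w : String) (acc : List String),
      0 ≤ t → j + t ≤ cols - 1 → (i + 1 - t).toNat < fuel →
    innerA mat "w" cols i j (PySem.List.pyRange (-t) (-(i + 1)) (-1)) w acc
      = bWalk mat rows cols (-1) 1 fuel (i - t) (j + t) w acc := by
  intro fuel
  induction fuel with
  | zero => intro t w acc _ _ hf; omega
  | succ m ih =>
    intro t w acc ht hinv hf
    by_cases hle : t ≤ i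
    · rw [PySem.List.pyRange_neg_one_cons (by omega)]
      simp only [innerA, set_shifts_w]
      rw [bWalk, if_pos (show 0 ≤ i - t ∧ i - t < rows ∧ 0 ≤ j + t ∧ j + t < cols from by omega)]
      by_cases hb : j + t = cols - 1
      · rw [if_pos (show (PySem.Str.isIn "w" "wxyz" && ((some (j + t) : Option Int) == some (cols - 1))) = true from by
            simp [hb]; decide)]
        rw [show (i + -t : Int) = i - t from by ring]
        cases m with
        | zero => rw [bWalk]
        | succ m' => rw [bWalk, if_neg (by omega)]
      · rw [if_neg (show ¬((PySem.Str.isIn "w" "wxyz" && ((some (j + t) : Option Int) == some (cols - 1))) = true) from by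
            simp [hb])]
        rw [show (i + -t : Int) = i - t from by ring, show (-t - 1 : Int) = -(t + 1) from by ring,
          show (i - t + -1 : Int) = i - (t + 1) from by ring, show (j + t + 1 : Int) = j + (t + 1) from by ring]
        exact ih (t + 1) _ _ (by omega) (by omega) (by omega)
    · rw [PySem.List.pyRange_neg_one_eq_nil (by omega)]
      rw [innerA, bWalk, if_neg (by omega)]

theorem inner_x (mat : List (List String)) (rows cols i j : Int)
    (hi : i < rows) (hjc : j < cols) :
    ∀ (fuel : Nat) (t : Int) (w : String) (acc : List String),
      0 ≤ t → t ≤ j → (i + 1 - t).toNat < fuel →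
    innerA mat "x" cols i j (PySem.List.pyRange (-t) (-(i + 1)) (-1)) w acc
      = bWalk mat rows cols (-1) (-1) fuel (i - t) (j - t) w acc := by
  intro fuel
  induction fuel with
  | zero => intro t w acc _ _ hf; omega
  | succ m ih =>
    intro t w acc ht hinv hf
    by_cases hle : t ≤ i
    · rw [PySem.List.pyRange_neg_one_cons (by omega)]
      simp only [innerA, set_shifts_x]
      rw [bWalk, if_pos (show 0 ≤ i - t ∧ i - t < rows ∧ 0 ≤ j - t ∧ j - t < cols from by omega)]
      by_cases hb : j - t = 0
      · rw [if_pos (show (PySem.Str.isIn "x" "wxyz" && ((some (j - t) : Option Int) == some 0)) = true from by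
            simp [hb]; decide)]
        rw [show (i + -t : Int) = i - t from by ring, show (j + -t : Int) = j - t from by ring]
        cases m with
        | zero => rw [bWalk]
        | succ m' => rw [bWalk, if_neg (by omega)]
      · rw [if_neg (show ¬((PySem.Str.isIn "x" "wxyz" && ((some (j - t) : Option Int) == some 0)) = true) from by
            simp [hb])]
        rw [show (i + -t : Int) = i - t from by ring, show (j + -t : Int) = j - t from by ring,
          show (-t - 1 : Int) = -(t + 1) from by ring, show (i - t + -1 : Int) = i - (t + 1) from by ring,
          show (j - t + -1 : Int) = j - (t + 1) from by ring]
        exact ih (t + 1) _ _ (by omega) (by omega) (by omega)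
    · rw [PySem.List.pyRange_neg_one_eq_nil (by omega)]
      rw [innerA, bWalk, if_neg (by omega)]

theorem inner_y (mat : List (List String)) (rows cols i j : Int)
    (hi0 : 0 ≤ i) (hj0 : 0 ≤ j) :
    ∀ (fuel : Nat) (t : Int) (w : String) (acc : List String),
      0 ≤ t → j + t ≤ cols - 1 → (rows - i - t).toNat < fuel →
    innerA mat "y" cols i j (PySem.List.pyRange t (rows - i) 1) w acc
      = bWalk mat rows cols 1 1 fuel (i + t) (j + t) w acc := by
  intro fuel
  induction fuel with
  | zero => intro t w acc _ _ hf; omega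
  | succ m ih =>
    intro t w acc ht hinv hf
    by_cases hlt : t < rows - i
    · rw [PySem.List.pyRange_one_cons hlt]
      simp only [innerA, set_shifts_y]
      rw [bWalk, if_pos (show 0 ≤ i + t ∧ i + t < rows ∧ 0 ≤ j + t ∧ j + t < cols from by omega)]
      by_cases hb : j + t = cols - 1
      · rw [if_pos (show (PySem.Str.isIn "y" "wxyz" && ((some (j + t) : Option Int) == some (cols - 1))) = true from by
            simp [hb]; decide)]
        cases m with
        | zero => rw [bWalk]
        | succ m' => rw [bWalk, if_neg (by omega)]
      · rw [if_neg (show ¬((PySem.Str.isIn "y" "wxyz" && ((some (j + t) : Option Int) == some (cols - 1))) = true) from by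
            simp [hb])]
        rw [show (i + t + 1 : Int) = i + (t + 1) from by ring, show (j + t + 1 : Int) = j + (t + 1) from by ring]
        exact ih (t + 1) _ _ (by omega) (by omega) (by omega)
    · rw [PySem.List.pyRange_one_eq_nil (by omega)]
      rw [innerA, bWalk, if_neg (by omega)]

theorem inner_z (mat : List (List String)) (rows cols i j : Int)
    (hi0 : 0 ≤ i) (hjc : j < cols) :
    ∀ (fuel : Nat) (t : Int) (w : String) (acc : List String),
      0 ≤ t → t ≤ j → (rows - i - t).toNat < fuel →
    innerA mat "z" cols i j (PySem.List.pyRange t (rows - i) 1) w acc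
      = bWalk mat rows cols 1 (-1) fuel (i + t) (j - t) w acc := by
  intro fuel
  induction fuel with
  | zero => intro t w acc _ _ hf; omega
  | succ m ih =>
    intro t w acc ht hinv hf
    by_cases hlt : t < rows - i
    · rw [PySem.List.pyRange_one_cons hlt]
      simp only [innerA, set_shifts_z]
      rw [bWalk, if_pos (show 0 ≤ i + t ∧ i + t < rows ∧ 0 ≤ j - t ∧ j - t < cols from by omega)]
      by_cases hb : j - t = 0
      · rw [if_pos (show (PySem.Str.isIn "z" "wxyz" && ((some (j - t) : Option Int) == some 0)) = true from by
            simp [hb]; decide)]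
        rw [show (j + -t : Int) = j - t from by ring]
        cases m with
        | zero => rw [bWalk]
        | succ m' => rw [bWalk, if_neg (by omega)]
      · rw [if_neg (show ¬((PySem.Str.isIn "z" "wxyz" && ((some (j - t) : Option Int) == some 0)) = true) from by
            simp [hb])]
        rw [show (j + -t : Int) = j - t from by ring, show (i + t + 1 : Int) = i + (t + 1) from by ring,
          show (j - t + -1 : Int) = j - (t + 1) from by ring]
        exact ih (t + 1) _ _ (by omega) (by omega) (by omega)
    · rw [PySem.List.pyRange_one_eq_nil (by omega)]
      rw [innerA, bWalk, if_neg (by omega)]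

theorem top_r (mat : List (List String)) :
    search_for_words mat "r" = search_for_words_alt mat "r" := by
  have main : ∀ (rows cols : Int),
      (PySem.List.pyRange 0 rows 1).foldl (fun acc i =>
        (PySem.List.pyRange 0 cols 1).foldl (fun acc j =>
          let sj := direction_instruction "r" i j rows cols
          innerA mat "r" cols i j (PySem.List.pyRange 0 sj.1 sj.2) "" acc) acc) ([] : List String)
      = (PySem.List.pyRange 0 rows 1).foldl (fun acc i =>
        (PySem.List.pyRange 0 cols 1).foldl (fun acc j =>
          bWalk mat rows cols 0 1 ((rows + cols).toNat + 1) i j "" acc) acc) [] := by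
    intro rows cols
    apply PySem.List.foldl_congr_mem
    intro acc i hi
    apply PySem.List.foldl_congr_mem
    intro acc2 j hj
    rw [PySem.List.mem_pyRange_one] at hi hj
    show innerA mat "r" cols i j (PySem.List.pyRange 0 (cols - j) 1) "" acc2
        = bWalk mat rows cols 0 1 ((rows + cols).toNat + 1) i j "" acc2
    have h := inner_r mat rows cols i j hi.1 hi.2 hj.1 ((rows + cols).toNat + 1) 0 "" acc2
      le_rfl (by omega)
    simpa using h
  exact main (mat.length : Int) (((PySem.List.pyGet? mat 0).getD []).length : Int)

theorem top_l (mat : List (List String)) :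
    search_for_words mat "l" = search_for_words_alt mat "l" := by
  have main : ∀ (rows cols : Int),
      (PySem.List.pyRange 0 rows 1).foldl (fun acc i =>
        (PySem.List.pyRange 0 cols 1).foldl (fun acc j =>
          let sj := direction_instruction "l" i j rows cols
          innerA mat "l" cols i j (PySem.List.pyRange 0 sj.1 sj.2) "" acc) acc) ([] : List String)
      = (PySem.List.pyRange 0 rows 1).foldl (fun acc i =>
        (PySem.List.pyRange 0 cols 1).foldl (fun acc j =>
          bWalk mat rows cols 0 (-1) ((rows + cols).toNat + 1) i j "" acc) acc) [] := by
    intro rows cols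
    apply PySem.List.foldl_congr_mem
    intro acc i hi
    apply PySem.List.foldl_congr_mem
    intro acc2 j hj
    rw [PySem.List.mem_pyRange_one] at hi hj
    show innerA mat "l" cols i j (PySem.List.pyRange 0 (-(j + 1)) (-1)) "" acc2
        = bWalk mat rows cols 0 (-1) ((rows + cols).toNat + 1) i j "" acc2
    have h := inner_l mat rows cols i j hi.1 hi.2 hj.2 ((rows + cols).toNat + 1) 0 "" acc2
      le_rfl (by omega)
    simpa using h
  exact main (mat.length : Int) (((PySem.List.pyGet? mat 0).getD []).length : Int)

theorem top_u (mat : List (List String)) :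
    search_for_words mat "u" = search_for_words_alt mat "u" := by
  have main : ∀ (rows cols : Int),
      (PySem.List.pyRange 0 rows 1).foldl (fun acc i =>
        (PySem.List.pyRange 0 cols 1).foldl (fun acc j =>
          let sj := direction_instruction "u" i j rows cols
          innerA mat "u" cols i j (PySem.List.pyRange 0 sj.1 sj.2) "" acc) acc) ([] : List String)
      = (PySem.List.pyRange 0 rows 1).foldl (fun acc i =>
        (PySem.List.pyRange 0 cols 1).foldl (fun acc j =>
          bWalk mat rows cols (-1) 0 ((rows + cols).toNat + 1) i j "" acc) acc) [] := by
    intro rows cols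
    apply PySem.List.foldl_congr_mem
    intro acc i hi
    apply PySem.List.foldl_congr_mem
    intro acc2 j hj
    rw [PySem.List.mem_pyRange_one] at hi hj
    show innerA mat "u" cols i j (PySem.List.pyRange 0 (-(i + 1)) (-1)) "" acc2
        = bWalk mat rows cols (-1) 0 ((rows + cols).toNat + 1) i j "" acc2
    have h := inner_u mat rows cols i j hi.2 hj.1 hj.2 ((rows + cols).toNat + 1) 0 "" acc2
      le_rfl (by omega)
    simpa using h
  exact main (mat.length : Int) (((PySem.List.pyGet? mat 0).getD []).length : Int)

theorem top_d (mat : List (List String)) :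
    search_for_words mat "d" = search_for_words_alt mat "d" := by
  have main : ∀ (rows cols : Int),
      (PySem.List.pyRange 0 rows 1).foldl (fun acc i =>
        (PySem.List.pyRange 0 cols 1).foldl (fun acc j =>
          let sj := direction_instruction "d" i j rows cols
          innerA mat "d" cols i j (PySem.List.pyRange 0 sj.1 sj.2) "" acc) acc) ([] : List String)
      = (PySem.List.pyRange 0 rows 1).foldl (fun acc i =>
        (PySem.List.pyRange 0 cols 1).foldl (fun acc j =>
          bWalk mat rows cols 1 0 ((rows + cols).toNat + 1) i j "" acc) acc) [] := by
    intro rows cols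
    apply PySem.List.foldl_congr_mem
    intro acc i hi
    apply PySem.List.foldl_congr_mem
    intro acc2 j hj
    rw [PySem.List.mem_pyRange_one] at hi hj
    show innerA mat "d" cols i j (PySem.List.pyRange 0 (rows - i) 1) "" acc2
        = bWalk mat rows cols 1 0 ((rows + cols).toNat + 1) i j "" acc2
    have h := inner_d mat rows cols i j hi.1 hj.1 hj.2 ((rows + cols).toNat + 1) 0 "" acc2
      le_rfl (by omega)
    simpa using h
  exact main (mat.length : Int) (((PySem.List.pyGet? mat 0).getD []).length : Int)

theorem top_w (mat : List (List String)) :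
    search_for_words mat "w" = search_for_words_alt mat "w" := by
  have main : ∀ (rows cols : Int),
      (PySem.List.pyRange 0 rows 1).foldl (fun acc i =>
        (PySem.List.pyRange 0 cols 1).foldl (fun acc j =>
          let sj := direction_instruction "w" i j rows cols
          innerA mat "w" cols i j (PySem.List.pyRange 0 sj.1 sj.2) "" acc) acc) ([] : List String)
      = (PySem.List.pyRange 0 rows 1).foldl (fun acc i =>
        (PySem.List.pyRange 0 cols 1).foldl (fun acc j =>
          bWalk mat rows cols (-1) 1 ((rows + cols).toNat + 1) i j "" acc) acc) [] := by
    intro rows cols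
    apply PySem.List.foldl_congr_mem
    intro acc i hi
    apply PySem.List.foldl_congr_mem
    intro acc2 j hj
    rw [PySem.List.mem_pyRange_one] at hi hj
    show innerA mat "w" cols i j (PySem.List.pyRange 0 (-(i + 1)) (-1)) "" acc2
        = bWalk mat rows cols (-1) 1 ((rows + cols).toNat + 1) i j "" acc2
    have h := inner_w mat rows cols i j hi.2 hj.1 ((rows + cols).toNat + 1) 0 "" acc2
      le_rfl (by omega) (by omega)
    simpa using h
  exact main (mat.length : Int) (((PySem.List.pyGet? mat 0).getD []).length : Int)

theorem top_x (mat : List (List String)) :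
    search_for_words mat "x" = search_for_words_alt mat "x" := by
  have main : ∀ (rows cols : Int),
      (PySem.List.pyRange 0 rows 1).foldl (fun acc i =>
        (PySem.List.pyRange 0 cols 1).foldl (fun acc j =>
          let sj := direction_instruction "x" i j rows cols
          innerA mat "x" cols i j (PySem.List.pyRange 0 sj.1 sj.2) "" acc) acc) ([] : List String)
      = (PySem.List.pyRange 0 rows 1).foldl (fun acc i =>
        (PySem.List.pyRange 0 cols 1).foldl (fun acc j =>
          bWalk mat rows cols (-1) (-1) ((rows + cols).toNat + 1) i j "" acc) acc) [] := by
    intro rows cols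
    apply PySem.List.foldl_congr_mem
    intro acc i hi
    apply PySem.List.foldl_congr_mem
    intro acc2 j hj
    rw [PySem.List.mem_pyRange_one] at hi hj
    show innerA mat "x" cols i j (PySem.List.pyRange 0 (-(i + 1)) (-1)) "" acc2
        = bWalk mat rows cols (-1) (-1) ((rows + cols).toNat + 1) i j "" acc2
    have h := inner_x mat rows cols i j hi.2 hj.2 ((rows + cols).toNat + 1) 0 "" acc2
      le_rfl (by omega) (by omega)
    simpa using h
  exact main (mat.length : Int) (((PySem.List.pyGet? mat 0).getD []).length : Int)

theorem top_y (mat : List (List String)) :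
    search_for_words mat "y" = search_for_words_alt mat "y" := by
  have main : ∀ (rows cols : Int),
      (PySem.List.pyRange 0 rows 1).foldl (fun acc i =>
        (PySem.List.pyRange 0 cols 1).foldl (fun acc j =>
          let sj := direction_instruction "y" i j rows cols
          innerA mat "y" cols i j (PySem.List.pyRange 0 sj.1 sj.2) "" acc) acc) ([] : List String)
      = (PySem.List.pyRange 0 rows 1).foldl (fun acc i =>
        (PySem.List.pyRange 0 cols 1).foldl (fun acc j =>
          bWalk mat rows cols 1 1 ((rows + cols).toNat + 1) i j "" acc) acc) [] := by
    intro rows cols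
    apply PySem.List.foldl_congr_mem
    intro acc i hi
    apply PySem.List.foldl_congr_mem
    intro acc2 j hj
    rw [PySem.List.mem_pyRange_one] at hi hj
    show innerA mat "y" cols i j (PySem.List.pyRange 0 (rows - i) 1) "" acc2
        = bWalk mat rows cols 1 1 ((rows + cols).toNat + 1) i j "" acc2
    have h := inner_y mat rows cols i j hi.1 hj.1 ((rows + cols).toNat + 1) 0 "" acc2
      le_rfl (by omega) (by omega)
    simpa using h
  exact main (mat.length : Int) (((PySem.List.pyGet? mat 0).getD []).length : Int)

theorem top_z (mat : List (List String)) :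
    search_for_words mat "z" = search_for_words_alt mat "z" := by
  have main : ∀ (rows cols : Int),
      (PySem.List.pyRange 0 rows 1).foldl (fun acc i =>
        (PySem.List.pyRange 0 cols 1).foldl (fun acc j =>
          let sj := direction_instruction "z" i j rows cols
          innerA mat "z" cols i j (PySem.List.pyRange 0 sj.1 sj.2) "" acc) acc) ([] : List String)
      = (PySem.List.pyRange 0 rows 1).foldl (fun acc i =>
        (PySem.List.pyRange 0 cols 1).foldl (fun acc j =>
          bWalk mat rows cols 1 (-1) ((rows + cols).toNat + 1) i j "" acc) acc) [] := by
    intro rows cols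
    apply PySem.List.foldl_congr_mem
    intro acc i hi
    apply PySem.List.foldl_congr_mem
    intro acc2 j hj
    rw [PySem.List.mem_pyRange_one] at hi hj
    show innerA mat "z" cols i j (PySem.List.pyRange 0 (rows - i) 1) "" acc2
        = bWalk mat rows cols 1 (-1) ((rows + cols).toNat + 1) i j "" acc2
    have h := inner_z mat rows cols i j hi.1 hj.2 ((rows + cols).toNat + 1) 0 "" acc2
      le_rfl (by omega) (by omega)
    simpa using h
  exact main (mat.length : Int) (((PySem.List.pyGet? mat 0).getD []).length : Int)

-- ===== VERDICT (by name: the statement is the Claim_ definition above) =====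
theorem search_for_words_spec : Claim_equal_search_for_words := by
  intro mat direction _ hpre
  unfold Spec_search_for_words
  have hd := hpre.2.2
  simp only [List.mem_cons, List.not_mem_nil, or_false] at hd
  rcases hd with rfl | rfl | rfl | rfl | rfl | rfl | rfl | rfl
  · exact top_r mat
  · exact top_l mat
  · exact top_u mat
  · exact top_d mat
  · exact top_w mat
  · exact top_x mat
  · exact top_y mat
  · exact top_z mat
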